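-- pv_equiv track=rewrite | github.com/Curious-chen/self-made-c-compile | chensong/code/Demo.py | back_write
-- ===== SOURCE A (Python) =====
-- def back_write(tmp, dic):  # tmp为流图 dic为基本块
--     for key in tmp.keys():
--         lens = 0
--         list_ = []
--         if len(tmp[key]) == 1:  # 要么跳转语句存在 要么顺序语句
--             for index, per in enumerate(dic[key]):
--                 if per[0] in ['j', 'con', 'continue'] and dic[key][index - 1][0] not in ['j==', 'j>', 'j<', 'jnz']:
--                     list_.extend([index, dic[key][index:]])
--                     break
--             if len(list_) != 0:
--                 t = list(tmp[key])[0]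
--                 for key_ in dic.keys():
--                     if key_ != t:
--                         lens += len(dic[key_])
--                     else:
--                         break
--                 dic[key][list_[0]][-1] = str(lens)
--         if len(tmp[key]) == 2:  # 跳转语句
--             for index, per in enumerate(dic[key]):
--                 if per[0] in ['j==', 'j>', 'j<', 'j', 'jnz']:
--                     list_.extend([index, dic[key][index:]])
--                     break
--             if len(list_) != 0:
--                 pos = list_[0]
--                 for index, i in enumerate(tmp[key]):
--                     lens, pos = 0, pos + index
--                     for key_ in dic.keys():
--                         if key_ != i:
--                             lens += len(dic[key_])
--                         else:
--                             break
--                     dic[key][pos][-1] = str(lens)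
--     return dic
-- ===== SOURCE B (Python) =====
-- def back_write(tmp, dic):
--     # Precompute, in one pass, each block's starting offset (total length of the
--     # blocks before it in dic order); a jump to an unknown label gets the total.
--     offsets, total = {}, 0
--     for k, block in dic.items():
--         offsets[k] = total
--         total += len(block)
--
--     def off(target):
--         return str(offsets.get(target, total))
--
--     for key, succs in tmp.items():
--         if len(succs) == 1:
--             block = dic[key]
--             hit = next((i for i, per in enumerate(block)
--                         if per[0] in ('j', 'con', 'continue')
--                         and block[i - 1][0] not in ('j==', 'j>', 'j<', 'jnz')), None)
--             if hit is not None: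
--                 block[hit][-1] = off(succs[0])
--         elif len(succs) == 2:
--             block = dic[key]
--             hit = next((i for i, per in enumerate(block)
--                         if per[0] in ('j==', 'j>', 'j<', 'j', 'jnz')), None)
--             if hit is not None:
--                 block[hit][-1] = off(succs[0])
--                 block[hit + 1][-1] = off(succs[1])
--     return dic
-- ===== Notes on version B (the rewrite author's own statement) =====
-- stated objective: alternative
-- what changed: B precomputes every block's starting offset (prefix sums of block lengths) in one dict pass and replaces A's per-jump rescan of dic with a dict lookup, writing the jump targets directly instead of via A's list_ accumulator; on the measured random inputs this was not faster (the rescans are rarely the dominant cost there), so no speed is claimed.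
import Mathlib
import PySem

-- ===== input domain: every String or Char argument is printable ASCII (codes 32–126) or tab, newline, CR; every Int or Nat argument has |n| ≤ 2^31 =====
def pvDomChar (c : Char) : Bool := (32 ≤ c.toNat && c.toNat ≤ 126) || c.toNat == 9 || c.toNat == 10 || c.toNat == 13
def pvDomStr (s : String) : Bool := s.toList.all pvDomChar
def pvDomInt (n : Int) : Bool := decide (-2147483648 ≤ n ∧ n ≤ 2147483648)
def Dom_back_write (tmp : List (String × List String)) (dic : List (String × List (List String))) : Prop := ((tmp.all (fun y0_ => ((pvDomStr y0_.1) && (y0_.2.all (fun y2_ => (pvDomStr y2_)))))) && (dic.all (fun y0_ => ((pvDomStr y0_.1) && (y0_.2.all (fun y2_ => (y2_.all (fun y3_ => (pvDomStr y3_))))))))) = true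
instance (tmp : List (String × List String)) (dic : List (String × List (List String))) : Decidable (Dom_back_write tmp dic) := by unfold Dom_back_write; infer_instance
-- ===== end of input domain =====

-- Note: the Python A mutates `dic` in place and returns it; B performs the same in-place
-- writes.  The equivalence proved here is about the returned dictionary (assoc list).

-- shared literal constants (the opcode lists both Python sources spell out)
def pvJ1 : List String := ["j", "con", "continue"]
def pvJC : List String := ["j==", "j>", "j<", "jnz"]
def pvJ2 : List String := ["j==", "j>", "j<", "j", "jnz"]

-- l[-1] = s on a nonempty Python list (Pre_ keeps every written instruction nonempty)
def pvSetLast (l : List String) (s : String) : List String := l.dropLast ++ [s]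

-- dic[key] = <new list object contents>: overwrite the value at the (unique) key in place
def pvSetVal (d : List (String × List (List String))) (k : String) (v : List (List String)) :
    List (String × List (List String)) :=
  match d with
  | [] => []
  | (k', v') :: rest => if k' = k then (k', v) :: rest else (k', v') :: pvSetVal rest k v

-- ===== PORT A =====
-- A's first scan: `for index, per in enumerate(dic[key]): if per[0] in [...] and dic[key][index-1][0] not in [...]`.
-- `list_` holds [index, dic[key][index:]], but the slice is never read afterwards: ported as the index alone.
-- `per[0]` on an empty instruction raises IndexError in Python (excluded by Pre_): headD "".
def pvScanA1 (full : List (List String)) : List (List String) → Nat → Option Nat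
  | [], _ => none
  | per :: rest, i =>
    if per.head?.getD "" ∈ pvJ1 ∧ ((PySem.List.pyGet? full ((i : Int) - 1)).getD []).head?.getD "" ∉ pvJC
    then some i else pvScanA1 full rest (i + 1)

-- A's second scan: `if per[0] in ['j==', 'j>', 'j<', 'j', 'jnz']`
def pvScanA2 : List (List String) → Nat → Option Nat
  | [], _ => none
  | per :: rest, i => if per.head?.getD "" ∈ pvJ2 then some i else pvScanA2 rest (i + 1)

-- A's inner loop `for key_ in dic.keys(): if key_ != t: lens += len(dic[key_]) else: break`
def pvSumUntil : List (String × List (List String)) → String → Nat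
  | [], _ => 0
  | (k, v) :: rest, t => if k ≠ t then v.length + pvSumUntil rest t else 0

-- one iteration of A's outer `for key in tmp.keys()` (d is the current, already mutated dic)
def pvStepA (d : List (String × List (List String))) (kv : String × List String) :
    List (String × List (List String)) :=
  match List.lookup kv.1 d with
  | none => d      -- Python: dic[key] raises KeyError; excluded by Pre_
  | some block =>
    if kv.2.length = 1 then
      match pvScanA1 block block 0 with
      | none => d
      | some i =>
        let t := kv.2.head?.getD ""                       -- t = list(tmp[key])[0]
        let lens := pvSumUntil d t
        pvSetVal d kv.1 (block.set i (pvSetLast (block.getD i []) (PySem.Int.toStr (lens : Int))))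
    else if kv.2.length = 2 then
      match pvScanA2 block 0 with
      | none => d
      | some p =>
        -- `for index, i in enumerate(tmp[key]): lens, pos = 0, pos + index; ...; dic[key][pos][-1] = str(lens)`
        -- the in-place writes never change any block's length, so reading `pvSumUntil d` mid-loop is exact;
        -- dic[key][pos] out of range raises IndexError in Python (excluded by Pre_): List.set is then a no-op.
        let r := (PySem.List.enumerate kv.2).foldl
          (fun (st : List (List String) × Int) q =>
            let pos := st.2 + q.1
            let lens := pvSumUntil d q.2
            (st.1.set pos.toNat (pvSetLast (st.1.getD pos.toNat []) (PySem.Int.toStr (lens : Int))), pos))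
          (block, (p : Int))
        pvSetVal d kv.1 r.1
    else d

def back_write (tmp : List (String × List String)) (dic : List (String × List (List String))) :
    List (String × List (List String)) :=
  tmp.foldl pvStepA dic

-- ===== PORT B =====
-- B precomputes each block's starting offset in one pass: offsets[k] = total length before k.
def pvBuildOff (dic : List (String × List (List String))) : PySem.Dict String Nat × Nat :=
  dic.foldl (fun st kv => (st.1.insert kv.1 st.2, st.2 + kv.2.length)) (PySem.Dict.empty, 0)

-- B's `off(target) = str(offsets.get(target, total))`
def pvOff (offs : PySem.Dict String Nat) (total : Nat) (t : String) : String :=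
  PySem.Int.toStr ((offs.getD t total : Nat) : Int)

-- B's `next((i for i, per in enumerate(block) if ...), None)` scans
def pvHit1 (block : List (List String)) : Option Nat :=
  ((PySem.List.enumerate block).find? (fun q =>
      decide (q.2.head?.getD "" ∈ pvJ1 ∧
        ((PySem.List.pyGet? block (q.1 - 1)).getD []).head?.getD "" ∉ pvJC))).map (fun q => q.1.toNat)

def pvHit2 (block : List (List String)) : Option Nat :=
  block.findIdx? (fun per => decide (per.head?.getD "" ∈ pvJ2))

def pvStepB (offs : PySem.Dict String Nat) (total : Nat)
    (d : List (String × List (List String))) (kv : String × List String) :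
    List (String × List (List String)) :=
  if kv.2.length = 1 then
    match List.lookup kv.1 d with
    | none => d
    | some block =>
      match pvHit1 block with
      | none => d
      | some i =>
        pvSetVal d kv.1 (block.set i (pvSetLast (block.getD i []) (pvOff offs total (kv.2.head?.getD ""))))
  else if kv.2.length = 2 then
    match List.lookup kv.1 d with
    | none => d
    | some block =>
      match pvHit2 block with
      | none => d
      | some i =>
        let b1 := block.set i (pvSetLast (block.getD i []) (pvOff offs total (kv.2.getD 0 "")))
        let b2 := b1.set (i + 1) (pvSetLast (b1.getD (i + 1) []) (pvOff offs total (kv.2.getD 1 "")))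
        pvSetVal d kv.1 b2
  else d

def back_write_alt (tmp : List (String × List String)) (dic : List (String × List (List String))) :
    List (String × List (List String)) :=
  let p := pvBuildOff dic
  tmp.foldl (pvStepB p.1 p.2) dic

-- ===== PRECONDITION & SPEC =====
-- Both arguments are Python dicts, so their keys are distinct; a tmp key with 1 or 2
-- successors must be a dic key (else dic[key] raises KeyError).  Pre_ also keeps every instruction of every PROCESSED block
-- (a block whose tmp entry has 1 or 2 successors) nonempty — A raises IndexError (per[0]) when an
-- empty instruction is scanned, though it can still return when an empty instruction sits after
-- the first jump; that slightly narrower shape condition is the natural domain (see cites).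
-- For a 2-successor key the first conditional jump must not be the block's last instruction
-- (else A's second write dic[key][pos+1] raises IndexError).
def pvPreKey (dic : List (String × List (List String))) (p : String × List String) : Bool :=
  match List.lookup p.1 dic with
  | none => !(decide (p.2.length = 1 ∨ p.2.length = 2))
  | some blk =>
    (!(decide (p.2.length = 1 ∨ p.2.length = 2)) || decide ([] ∉ blk)) &&
    (!(decide (p.2.length = 2)) ||
      (match blk.findIdx? (fun per => decide (per.head?.getD "" ∈ pvJ2)) with
       | none => true
       | some i => decide (i + 1 < blk.length)))

def Pre_back_write (tmp : List (String × List String)) (dic : List (String × List (List String))) : Prop :=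
  (tmp.map Prod.fst).Nodup ∧ (dic.map Prod.fst).Nodup ∧ ∀ p ∈ tmp, pvPreKey dic p = true

instance (tmp : List (String × List String)) (dic : List (String × List (List String))) :
    Decidable (Pre_back_write tmp dic) := by unfold Pre_back_write; infer_instance

def pvWitness_back_write : (List (String × List String)) × (List (String × List (List String))) :=
  ([("a", ["b"]), ("b", ["a", "c"])],
   [("a", [["mov", "x"], ["j", "0"]]), ("b", [["j==", "y", "0"], ["j", "0"]]), ("c", [["ret"]])])

def Spec_back_write (tmp : List (String × List String)) (dic : List (String × List (List String))) (out : List (String × List (List String))) : Prop := out = back_write_alt tmp dic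
instance (tmp : List (String × List String)) (dic : List (String × List (List String))) (out : List (String × List (List String))) : Decidable (Spec_back_write tmp dic out) := by unfold Spec_back_write; infer_instance

-- ===== CLAIM (what is proved, stated in full; the proofs are below) =====
def Claim_equal_back_write : Prop := ∀ (tmp : List (String × List String)) (dic : List (String × List (List String))), Dom_back_write tmp dic → Pre_back_write tmp dic → Spec_back_write tmp dic (back_write tmp dic)

-- ===== LEMMAS AND PROOFS =====

-- key/length shape of a dictionary: all that A's offset computation ever reads
def pvKLen (kv : String × List (List String)) : String × Nat := (kv.1, kv.2.length)

theorem pvScanA1_eq_find (full : List (List String)) :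
    ∀ (l : List (List String)) (i : Nat),
      pvScanA1 full l i =
        ((PySem.List.enumerate l (i : Int)).find? (fun q =>
            decide (q.2.head?.getD "" ∈ pvJ1 ∧
              ((PySem.List.pyGet? full (q.1 - 1)).getD []).head?.getD "" ∉ pvJC))).map (fun q => q.1.toNat) := by
  intro l
  induction l with
  | nil => intro i; simp [pvScanA1, PySem.List.enumerate_nil]
  | cons per rest ih =>
    intro i
    have hcast : ((i : Int) + 1) = ((i + 1 : Nat) : Int) := by push_cast; ring
    by_cases hc1 : per.head?.getD "" ∈ pvJ1
    · by_cases hc2 : ((PySem.List.pyGet? full ((i : Int) - 1)).getD []).head?.getD "" ∈ pvJC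
      · rw [pvScanA1, if_neg (by simp [hc2]), PySem.List.enumerate_cons]
        rw [List.find?_cons_of_neg (by simp [hc2]), hcast, ih (i + 1)]
      · rw [pvScanA1, if_pos ⟨hc1, hc2⟩, PySem.List.enumerate_cons]
        rw [List.find?_cons_of_pos (by simp [hc1, hc2])]
        simp
    · rw [pvScanA1, if_neg (by simp [hc1]), PySem.List.enumerate_cons]
      rw [List.find?_cons_of_neg (by simp [hc1]), hcast, ih (i + 1)]

theorem pvScanA2_eq_findIdx :
    ∀ (l : List (List String)) (i : Nat),
      pvScanA2 l i = (l.findIdx? (fun per => decide (per.head?.getD "" ∈ pvJ2))).map (· + i) := by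
  intro l
  induction l with
  | nil => intro i; simp [pvScanA2]
  | cons per rest ih =>
    intro i
    rw [pvScanA2, List.findIdx?_cons]
    by_cases hc : per.head?.getD "" ∈ pvJ2
    · rw [if_pos hc, if_pos (decide_eq_true hc)]
      simp
    · rw [if_neg hc, if_neg (by simp [hc]), ih (i + 1)]
      cases h : List.findIdx? (fun per => decide (per.head?.getD "" ∈ pvJ2)) rest
      · rfl
      · simp
        omega

theorem pvSumUntil_congr (t : String) :
    ∀ (d d' : List (String × List (List String))), d.map pvKLen = d'.map pvKLen →
      pvSumUntil d t = pvSumUntil d' t := by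
  intro d
  induction d with
  | nil => intro d' h; cases d' <;> simp_all
  | cons kv rest ih =>
    intro d' h
    cases d' with
    | nil => simp at h
    | cons kv' rest' =>
      obtain ⟨k, v⟩ := kv
      obtain ⟨k', v'⟩ := kv'
      simp [pvKLen] at h
      obtain ⟨⟨hk, hv⟩, hrest⟩ := h
      subst hk
      simp [pvSumUntil, hv, ih rest' hrest]

theorem pvBuildOff_getD (t : String) (dic : List (String × List (List String)))
    (hnd : (dic.map Prod.fst).Nodup) :
    (pvBuildOff dic).1.getD t (pvBuildOff dic).2 = pvSumUntil dic t := by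
  have stable : ∀ (l : List (String × List (List String))) (acc : PySem.Dict String Nat) (n m : Nat),
      acc.get? t = some m → t ∉ l.map Prod.fst →
      ((l.foldl (fun st kv => (st.1.insert kv.1 st.2, st.2 + kv.2.length)) (acc, n)).1).get? t = some m := by
    intro l
    induction l with
    | nil => intro acc n m h _; simpa using h
    | cons kv rest ih =>
      intro acc n m h ht
      have ht1 : t ≠ kv.1 := fun he => ht (by simp [he])
      have ht2 : t ∉ rest.map Prod.fst := fun hm => ht (by simp [hm])
      exact ih _ _ m (by rw [PySem.Dict.get?_insert_of_ne _ _ ht1]; exact h) ht2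
  have main : ∀ (l : List (String × List (List String))) (acc : PySem.Dict String Nat) (n : Nat),
      acc.get? t = none → (l.map Prod.fst).Nodup →
      ((l.foldl (fun st kv => (st.1.insert kv.1 st.2, st.2 + kv.2.length)) (acc, n)).1).getD t
        ((l.foldl (fun st kv => (st.1.insert kv.1 st.2, st.2 + kv.2.length)) (acc, n)).2)
      = n + pvSumUntil l t := by
    intro l
    induction l with
    | nil => intro acc n h _; simp [pvSumUntil, PySem.Dict.getD_of_get?_eq_none _ _ h]
    | cons kv rest ih =>
      intro acc n h hnd
      obtain ⟨k, v⟩ := kv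
      rw [List.map_cons, List.nodup_cons] at hnd
      by_cases hk : k = t
      · subst hk
        have h1 : (acc.insert k n).get? k = some n := PySem.Dict.get?_insert_self _ _ _
        have h2 := stable rest (acc.insert k n) (n + v.length) n h1 hnd.1
        simp only [List.foldl_cons]
        rw [PySem.Dict.getD_eq_get?_getD, h2]
        simp [pvSumUntil]
      · have h1 : (acc.insert k n).get? t = none := by
          rw [PySem.Dict.get?_insert_of_ne _ _ (fun he => hk he.symm)]; exact h
        simp only [List.foldl_cons]
        rw [ih (acc.insert k n) (n + v.length) h1 hnd.2]
        simp [pvSumUntil, hk]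
        omega
  have h0 : (PySem.Dict.empty : PySem.Dict String Nat).get? t = none := by
    simp [PySem.Dict.get?_empty]
  simpa using main dic PySem.Dict.empty 0 h0 hnd

theorem pvSetVal_map_klen (k : String) (v : List (List String)) :
    ∀ (d : List (String × List (List String))),
      (∀ blk, List.lookup k d = some blk → v.length = blk.length) →
      (pvSetVal d k v).map pvKLen = d.map pvKLen := by
  intro d
  induction d with
  | nil => intro _; rfl
  | cons kv rest ih =>
    intro h
    obtain ⟨k', v'⟩ := kv
    by_cases hk : k' = k
    · subst hk
      have := h v' (by rw [List.lookup_cons]; simp)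
      simp [pvSetVal, pvKLen, this]
    · have hb : (k == k') = false := beq_eq_false_iff_ne.mpr (Ne.symm hk)
      simp only [pvSetVal, if_neg hk, List.map_cons]
      rw [ih (fun blk hblk => h blk (by rw [List.lookup_cons]; simp [hb]; exact hblk))]

theorem lookup_pvSetVal_ne (k k' : String) (v : List (List String)) (h : k' ≠ k) :
    ∀ (d : List (String × List (List String))),
      List.lookup k' (pvSetVal d k v) = List.lookup k' d := by
  intro d
  induction d with
  | nil => rfl
  | cons kv rest ih =>
    obtain ⟨k1, v1⟩ := kv
    by_cases hk : k1 = k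
    · subst hk
      have hb : (k' == k1) = false := by simpa using h
      simp [pvSetVal, List.lookup_cons, hb]
    · simp only [pvSetVal, if_neg hk, List.lookup_cons]
      cases hb : k' == k1 <;> simp [ih]

theorem pvStep_eq (dic d : List (String × List (List String))) (kv : String × List String)
    (h1 : d.map pvKLen = dic.map pvKLen)
    (h2 : List.lookup kv.1 d = List.lookup kv.1 dic)
    (hnd : (dic.map Prod.fst).Nodup) :
    pvStepA d kv = pvStepB (pvBuildOff dic).1 (pvBuildOff dic).2 d kv := by
  obtain ⟨k, succs⟩ := kv
  have hsum : ∀ t, PySem.Int.toStr ((pvSumUntil d t : Nat) : Int)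
      = pvOff (pvBuildOff dic).1 (pvBuildOff dic).2 t := by
    intro t
    rw [pvOff, pvBuildOff_getD t dic hnd, pvSumUntil_congr t d dic h1]
  cases hl : List.lookup k d with
  | none =>
    simp only [pvStepA, pvStepB, hl]
    split_ifs <;> rfl
  | some block =>
    simp only [pvStepA, pvStepB, hl]
    by_cases hL1 : succs.length = 1
    · rw [if_pos hL1, if_pos hL1]
      have hscan : pvScanA1 block block 0 = pvHit1 block := by
        rw [pvScanA1_eq_find block block 0]; simp [pvHit1]
      rw [hscan]
      cases pvHit1 block with
      | none => rfl
      | some i => simp only [hsum]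
    · rw [if_neg hL1, if_neg hL1]
      by_cases hL2 : succs.length = 2
      · rw [if_pos hL2, if_pos hL2]
        obtain ⟨s0, s1, rfl⟩ := List.length_eq_two.mp hL2
        have hscan : pvScanA2 block 0 = pvHit2 block := by
          rw [pvScanA2_eq_findIdx block 0]; simp [pvHit2]
        rw [hscan]
        cases pvHit2 block with
        | none => rfl
        | some p =>
          simp only [PySem.List.enumerate_cons, PySem.List.enumerate_nil,
            List.foldl_cons, List.foldl_nil, List.getD]
          norm_num [hsum]
      · rw [if_neg hL2, if_neg hL2]

theorem pvStepA_map_klen (d : List (String × List (List String))) (kv : String × List String) :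
    (pvStepA d kv).map pvKLen = d.map pvKLen := by
  obtain ⟨k, succs⟩ := kv
  have hfoldlen : ∀ (l : List (Int × String)) (st : List (List String) × Int),
      ((l.foldl (fun (st : List (List String) × Int) q =>
          let pos := st.2 + q.1
          let lens := pvSumUntil d q.2
          (st.1.set pos.toNat (pvSetLast (st.1.getD pos.toNat []) (PySem.Int.toStr (lens : Int))), pos))
        st).1).length = st.1.length := by
    intro l
    induction l with
    | nil => intro st; rfl
    | cons q rest ih => intro st; rw [List.foldl_cons, ih]; simp
  cases hl : List.lookup k d with
  | none => simp only [pvStepA, hl]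
  | some block =>
    simp only [pvStepA, hl]
    by_cases hL1 : succs.length = 1
    · rw [if_pos hL1]
      cases pvScanA1 block block 0 with
      | none => rfl
      | some i =>
        apply pvSetVal_map_klen
        intro blk hblk
        rw [hl] at hblk
        injection hblk with hblk
        subst hblk
        simp
    · rw [if_neg hL1]
      by_cases hL2 : succs.length = 2
      · rw [if_pos hL2]
        cases pvScanA2 block 0 with
        | none => rfl
        | some p =>
          apply pvSetVal_map_klen
          intro blk hblk
          rw [hl] at hblk
          injection hblk with hblk
          subst hblk
          simpa using hfoldlen (PySem.List.enumerate succs) (block, (p : Int))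
      · rw [if_neg hL2]

theorem lookup_pvStepA_ne (d : List (String × List (List String))) (kv : String × List String)
    (k' : String) (h : k' ≠ kv.1) :
    List.lookup k' (pvStepA d kv) = List.lookup k' d := by
  obtain ⟨k, succs⟩ := kv
  simp only at h
  cases hl : List.lookup k d with
  | none => simp only [pvStepA, hl]
  | some block =>
    simp only [pvStepA, hl]
    by_cases hL1 : succs.length = 1
    · rw [if_pos hL1]
      cases pvScanA1 block block 0 with
      | none => rfl
      | some i => exact lookup_pvSetVal_ne k k' _ h d
    · rw [if_neg hL1]
      by_cases hL2 : succs.length = 2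
      · rw [if_pos hL2]
        cases pvScanA2 block 0 with
        | none => rfl
        | some p => exact lookup_pvSetVal_ne k k' _ h d
      · rw [if_neg hL2]

theorem pvFold_eq (dic : List (String × List (List String))) (hnd : (dic.map Prod.fst).Nodup) :
    ∀ (tmp : List (String × List String)) (d : List (String × List (List String))),
      (tmp.map Prod.fst).Nodup →
      d.map pvKLen = dic.map pvKLen →
      (∀ p ∈ tmp, List.lookup p.1 d = List.lookup p.1 dic) →
      tmp.foldl pvStepA d = tmp.foldl (pvStepB (pvBuildOff dic).1 (pvBuildOff dic).2) d := by
  intro tmp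
  induction tmp with
  | nil => intro d _ _ _; rfl
  | cons p rest ih =>
    intro d hndt h1 h2
    rw [List.map_cons, List.nodup_cons] at hndt
    rw [List.foldl_cons, List.foldl_cons,
      ← pvStep_eq dic d p h1 (h2 p (by simp)) hnd]
    apply ih (pvStepA d p) hndt.2
    · rw [pvStepA_map_klen d p]; exact h1
    · intro q hq
      have hne : q.1 ≠ p.1 := by
        intro he
        exact hndt.1 (he ▸ (List.mem_map.mpr ⟨q, hq, rfl⟩))
      rw [lookup_pvStepA_ne d p q.1 hne]
      exact h2 q (by simp [hq])

-- ===== VERDICT (by name: the statement is the Claim_ definition above) =====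
theorem back_write_spec : Claim_equal_back_write := by
  intro tmp dic _ hpre
  unfold Spec_back_write back_write back_write_alt
  exact pvFold_eq dic hpre.2.1 tmp dic hpre.1 rfl (fun _ _ => rfl)
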